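-- pv_equiv track=rewrite | github.com/Ray-SunR/leetcode | parenthesis.py | max_breadth
-- ===== SOURCE A (Python) =====
-- def max_breadth(s):
--     stk = []
--     hmap = {}
--     lvl = 0
--     ret = 0
--     for c in s:
--         if c == '(':
--             stk.append(c)
--             if lvl not in hmap:
--                 hmap[lvl] = 0
--             hmap[lvl] += 1
--             ret = max(hmap[lvl], ret)
--             lvl += 1
--         elif c == ')':
--             stk.pop(-1)
--             lvl -= 1
--     return ret
-- ===== SOURCE B (Python) =====
-- def max_breadth(s):
--     n = len(s)
--
--     def parse(i):
--         # returns (counts, j): counts[d] = number of '(' at relative depth d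
--         # inside the level starting at i; j = index just past this level.
--         counts = []
--         while i < n:
--             c = s[i]
--             i += 1
--             if c == '(':
--                 if counts:
--                     counts[0] += 1
--                 else:
--                     counts.append(1)
--                 inner, i = parse(i)
--                 for d, k in enumerate(inner):
--                     if d + 1 < len(counts):
--                         counts[d + 1] += k
--                     else:
--                         counts.append(k)
--             elif c == ')':
--                 break
--         return counts, i
--
--     counts, _ = parse(0)
--     return max(counts, default=0)
-- ===== Notes on version B (the rewrite author's own statement) =====
-- stated objective: alternative
-- what changed: B replaces A's flat left-to-right scan with a per-level dict and a running max by a recursive-descent parser: each parenthesis group is parsed recursively into a vector of per-relative-depth '(' counts, sibling/child vectors are merged by pointwise addition, and a single max over the top-level vector is taken at the end.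
import Mathlib
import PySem

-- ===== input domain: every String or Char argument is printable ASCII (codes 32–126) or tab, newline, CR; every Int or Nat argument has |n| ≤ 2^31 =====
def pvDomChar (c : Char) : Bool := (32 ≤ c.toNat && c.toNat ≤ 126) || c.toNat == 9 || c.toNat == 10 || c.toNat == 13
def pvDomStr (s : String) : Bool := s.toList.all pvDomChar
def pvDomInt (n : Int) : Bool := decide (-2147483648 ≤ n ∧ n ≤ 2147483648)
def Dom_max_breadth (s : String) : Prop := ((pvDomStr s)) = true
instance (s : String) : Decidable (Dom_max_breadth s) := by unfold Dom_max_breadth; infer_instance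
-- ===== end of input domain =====

-- B re-solves the task by recursive descent: each group is parsed into a vector of per-depth
-- '(' counts, child vectors are merged pointwise, and one max is taken at the end (objective:
-- alternative — a different algorithm of similar cost).

-- ===== PORT A =====
-- loop body of A: state (stk, hmap, lvl, ret)
def pvStepA (st : List Char × PySem.Dict Int Int × Int × Int) (c : Char) :
    List Char × PySem.Dict Int Int × Int × Int :=
  let (stk, hmap, lvl, ret) := st
  if c = '(' then
    let stk := stk ++ [c]
    let hmap := if hmap.contains lvl then hmap else hmap.insert lvl 0   -- if lvl not in hmap: hmap[lvl] = 0
    let hmap := hmap.modify lvl 0 (· + 1)                               -- hmap[lvl] += 1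
    let ret := max (hmap.getD lvl 0) ret                                -- ret = max(hmap[lvl], ret)
    (stk, hmap, lvl + 1, ret)
  else if c = ')' then
    match PySem.List.pop? stk (-1) with                                 -- stk.pop(-1)
    | some (_, stk') => (stk', hmap, lvl - 1, ret)
    | none => (stk, hmap, lvl, ret)   -- Python raises IndexError here; excluded by Pre_
  else (stk, hmap, lvl, ret)

def max_breadth (s : String) : Int :=
  (s.toList.foldl pvStepA ([], PySem.Dict.empty, 0, 0)).2.2.2

-- ===== PORT B =====
-- pointwise sum of two count vectors (Source B's in-place merge loop over `inner` with padding appends)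
def pvAddVec : List Int → List Int → List Int
  | xs, [] => xs
  | [], ys => ys
  | x :: xs, y :: ys => (x + y) :: pvAddVec xs ys

-- Source B's recursive `parse`: returns (per-relative-depth '(' counts of the level, remaining input).
-- The while loop is the sibling recursion; fuel (= input length at the top call) only makes the
-- nested recursion structurally total, it never changes the computed value.
def pvParse : Nat → List Char → List Int × List Char
  | 0, l => ([], l)
  | _ + 1, [] => ([], [])
  | f + 1, c :: r =>
    if c = '(' then
      let p := pvParse f r                      -- inner, i = parse(i)
      let q := pvParse f p.2                    -- rest of the while loop (further siblings)
      (pvAddVec (1 :: p.1) q.1, q.2)            -- counts[0] += 1; merge inner at offset 1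
    else if c = ')' then ([], r)                -- break: level ends
    else pvParse f r

def max_breadth_alt (s : String) : Int :=
  PySem.List.maxD (pvParse s.toList.length s.toList).1 (fun v => v) 0   -- max(counts, default=0)

-- ===== PRECONDITION & SPEC =====
-- Pre_ excludes exactly the strings with an unmatched ')' (some prefix holds more ')' than '('),
-- on which Python A raises IndexError in stk.pop(-1).
def Pre_max_breadth (s : String) : Prop :=
  ∀ p ∈ s.toList.inits, p.count ')' ≤ p.count '('
instance (s : String) : Decidable (Pre_max_breadth s) := by unfold Pre_max_breadth; infer_instance

def pvWitness_max_breadth : String := "a(()((x))) ()"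

def Spec_max_breadth (s : String) (out : Int) : Prop := out = max_breadth_alt s
instance (s : String) (out : Int) : Decidable (Spec_max_breadth s out) := by unfold Spec_max_breadth; infer_instance

-- ===== CLAIM (what is proved, stated in full; the proofs are below) =====
def Claim_equal_max_breadth : Prop := ∀ (s : String), Dom_max_breadth s → Pre_max_breadth s → Spec_max_breadth s (max_breadth s)

-- ===== LEMMAS AND PROOFS =====

-- proof-only helpers: matchedness scan, the depth of each '(' in order, net depth change
def pvOk : List Char → Int → Bool
  | [], _ => true
  | c :: r, d =>
    if c = '(' then pvOk r (d + 1)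
    else if c = ')' then decide (1 ≤ d) && pvOk r (d - 1)
    else pvOk r d

def pvDepths : List Char → Int → List Int
  | [], _ => []
  | c :: r, d =>
    if c = '(' then d :: pvDepths r (d + 1)
    else if c = ')' then pvDepths r (d - 1)
    else pvDepths r d

def pvLvl (l : List Char) : Int := (l.count '(' : Int) - (l.count ')' : Int)

lemma pvOk_open (r : List Char) (d : Int) : pvOk ('(' :: r) d = pvOk r (d + 1) := by
  simp [pvOk]

lemma pvOk_close (r : List Char) (d : Int) :
    pvOk (')' :: r) d = (decide (1 ≤ d) && pvOk r (d - 1)) := by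
  simp [pvOk]

lemma pvOk_other (c : Char) (r : List Char) (d : Int) (h1 : c ≠ '(') (h2 : c ≠ ')') :
    pvOk (c :: r) d = pvOk r d := by
  simp [pvOk, h1, h2]

lemma pvDepths_open (r : List Char) (d : Int) :
    pvDepths ('(' :: r) d = d :: pvDepths r (d + 1) := by
  simp [pvDepths]

lemma pvDepths_close (r : List Char) (d : Int) :
    pvDepths (')' :: r) d = pvDepths r (d - 1) := by
  simp [pvDepths]

lemma pvDepths_other (c : Char) (r : List Char) (d : Int) (h1 : c ≠ '(') (h2 : c ≠ ')') :
    pvDepths (c :: r) d = pvDepths r d := by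
  simp [pvDepths, h1, h2]

lemma pvLvl_nil : pvLvl [] = 0 := by simp [pvLvl]

lemma pvLvl_cons (c : Char) (r : List Char) :
    pvLvl (c :: r) = (if c = '(' then 1 else if c = ')' then -1 else 0) + pvLvl r := by
  simp only [pvLvl, List.count_cons]
  split_ifs with h1 h2 <;> simp_all <;> push_cast <;> ring

lemma pvLvl_append (u v : List Char) : pvLvl (u ++ v) = pvLvl u + pvLvl v := by
  simp [pvLvl, List.count_append]; push_cast; ring

-- A's two-step dict update ('insert 0 if absent, then += 1') is one counter bump.
lemma pvAStep_eq (d : PySem.Dict Int Int) (k : Int) :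
    (if d.contains k then d else d.insert k 0).modify k 0 (· + 1) = d.modify k 0 (· + 1) := by
  by_cases h : d.contains k
  · simp [h]
  · simp only [Bool.not_eq_true] at h
    simp [h, PySem.Dict.modify, PySem.Dict.getD_insert_self,
      PySem.Dict.insert_insert_self, PySem.Dict.getD_of_not_contains d 0 h]

lemma pvStepA_open (stk : List Char) (hm : PySem.Dict Int Int) (lvl ret : Int) :
    pvStepA (stk, hm, lvl, ret) '(' =
      (stk ++ ['('], hm.modify lvl 0 (· + 1), lvl + 1,
        max ((hm.modify lvl 0 (· + 1)).getD lvl 0) ret) := by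
  simp [pvStepA, pvAStep_eq]

lemma pvStepA_close (stk : List Char) (hm : PySem.Dict Int Int) (lvl ret : Int) :
    pvStepA (stk, hm, lvl, ret) ')' =
      (match PySem.List.pop? stk (-1) with
       | some (_, stk') => (stk', hm, lvl - 1, ret)
       | none => (stk, hm, lvl, ret)) := by
  simp [pvStepA]

lemma pvStepA_other (st : List Char × PySem.Dict Int Int × Int × Int) (c : Char)
    (h1 : c ≠ '(') (h2 : c ≠ ')') : pvStepA st c = st := by
  obtain ⟨stk, hm, lvl, ret⟩ := st
  simp [pvStepA, h1, h2]

-- running max over the per-key counts after one more occurrence of k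
lemma pvMapMax (S : List Int) (f g : Int → Int) (k : Int) (hnd : S.Nodup) (hk : k ∈ S)
    (hS : ∀ j ∈ S, j ≠ k → g j = f j) (hgk : g k = f k + 1) (hf : ∀ j ∈ S, 0 ≤ f j) :
    (S.map g).foldl max 0 = max (f k + 1) ((S.map f).foldl max 0) := by
  induction S using List.reverseRecOn with
  | nil => simp at hk
  | append_singleton S' x ih =>
    simp only [List.map_append, List.map_cons, List.map_nil, List.foldl_concat]
    rcases List.nodup_append.mp hnd with ⟨hnd', -, hdisj⟩
    by_cases hxk : x = k
    · subst hxk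
      have hx : x ∉ S' := fun hm => hdisj x hm x (by simp) rfl
      have hmg : S'.map g = S'.map f :=
        List.map_congr_left (fun j hj => hS j (by simp [hj]) (fun h => hx (h ▸ hj)))
      rw [hmg, hgk]
      have h0 : 0 ≤ f x := hf x (by simp)
      omega
    · have hk' : k ∈ S' := by
        rcases List.mem_append.mp hk with h | h
        · exact h
        · exact absurd (List.mem_singleton.mp h).symm hxk
      rw [hS x (by simp) hxk,
        ih hnd' hk' (fun j hj hne => hS j (by simp [hj]) hne) (fun j hj => hf j (by simp [hj]))]
      have h0 : 0 ≤ f x := hf x (by simp)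
      omega

-- the counter's value list as counts over the distinct elements
lemma pvValues_counter (xs : List Int) :
    (PySem.Dict.counter xs).values
      = (PySem.Set.ofList xs).map (fun j => ((xs.count j : Nat) : Int)) := by
  simp [PySem.Dict.values, PySem.Dict.items_counter, List.map_map, Function.comp_def]

lemma pvMaxStep (xs : List Int) (k : Int) :
    (PySem.Dict.counter (xs ++ [k])).values.foldl max 0
      = max ((xs.count k : Int) + 1) ((PySem.Dict.counter xs).values.foldl max 0) := by
  rw [pvValues_counter, pvValues_counter]
  by_cases hk : k ∈ xs
  · rw [PySem.Set.ofList_append_singleton,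
      PySem.Set.add_of_mem (by simpa [PySem.Set.mem_ofList] using hk)]
    exact pvMapMax _ _ _ k (PySem.Set.nodup_ofList _)
      (by simpa [PySem.Set.mem_ofList] using hk)
      (fun j _ hne => by simp [List.count_append, hne.symm])
      (by simp [List.count_append])
      (fun j _ => by positivity)
  · rw [PySem.Set.ofList_append_singleton,
      PySem.Set.add_of_not_mem (by simpa [PySem.Set.mem_ofList] using hk)]
    have hmap : ∀ j ∈ PySem.Set.ofList xs,
        (((xs ++ [k]).count j : Nat) : Int) = ((xs.count j : Nat) : Int) := by
      intro j hj
      have hjk : j ≠ k := fun h => hk (h ▸ (by simpa [PySem.Set.mem_ofList] using hj))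
      simp [List.count_append, hjk.symm]
    rw [List.map_append, List.map_cons, List.map_nil, List.foldl_concat,
      List.map_congr_left hmap]
    have h1 : (((xs ++ [k]).count k : Nat) : Int) = (xs.count k : Int) + 1 := by
      simp [List.count_append]
    rw [h1]
    omega

-- max(vs, default=0) is the running max from 0 when the values are nonnegative
lemma pvMaxD_eq (vs : List Int) (h : ∀ v ∈ vs, 0 ≤ v) :
    PySem.List.maxD vs (fun v => v) 0 = vs.foldl max 0 := by
  cases vs with
  | nil => rfl
  | cons v t =>
    rw [PySem.List.maxD, PySem.List.max?_id_cons, Option.getD_some, List.foldl_cons,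
      max_eq_right (h v (by simp))]

-- ---- generic running-max facts ----
lemma pvInitLe (xs : List Int) (a : Int) : a ≤ xs.foldl max a := by
  induction xs generalizing a with
  | nil => simp
  | cons x t ih => exact le_trans (le_max_left a x) (ih _)

lemma pvLeFold (xs : List Int) (a x : Int) (h : x ∈ xs) : x ≤ xs.foldl max a := by
  induction xs generalizing a with
  | nil => simp at h
  | cons y t ih =>
    rcases List.mem_cons.mp h with rfl | h
    · exact le_trans (le_max_right a x) (pvInitLe t _)
    · exact ih _ h

lemma pvFoldLe (xs : List Int) (a B : Int) (ha : a ≤ B) (h : ∀ x ∈ xs, x ≤ B) :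
    xs.foldl max a ≤ B := by
  induction xs generalizing a with
  | nil => simpa
  | cons x t ih =>
    exact ih _ (max_le ha (h x (by simp))) (fun y hy => h y (by simp [hy]))

-- ---- A-side: the scan computes the running max of the counter of pvDepths ----
lemma pvARun (l : List Char) : ∀ (stk : List Char) (ds : List Int),
    pvOk l (stk.length : Int) = true →
    ∃ stk' : List Char,
      l.foldl pvStepA (stk, PySem.Dict.counter ds, (stk.length : Int),
          (PySem.Dict.counter ds).values.foldl max 0)
        = (stk', PySem.Dict.counter (ds ++ pvDepths l (stk.length : Int)),
           (stk.length : Int) + pvLvl l,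
           (PySem.Dict.counter (ds ++ pvDepths l (stk.length : Int))).values.foldl max 0) := by
  induction l with
  | nil => intro stk ds _; exact ⟨stk, by simp [pvDepths, pvLvl_nil]⟩
  | cons c r ih =>
    intro stk ds hok
    by_cases hc : c = '('
    · subst hc
      have hok' : pvOk r (((stk ++ ['(']).length : Nat) : Int) = true := by
        rw [pvOk_open] at hok
        have h : (((stk ++ ['(']).length : Nat) : Int) = (stk.length : Int) + 1 := by
          simp
        rw [h]; exact hok
      obtain ⟨stk', hrun⟩ := ih (stk ++ ['(']) (ds ++ [(stk.length : Int)]) hok'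
      refine ⟨stk', ?_⟩
      rw [List.foldl_cons, pvStepA_open]
      have hret : max ((PySem.Dict.counter ds |>.modify (stk.length : Int) 0 (· + 1)).getD
            (stk.length : Int) 0) ((PySem.Dict.counter ds).values.foldl max 0)
          = (PySem.Dict.counter (ds ++ [(stk.length : Int)])).values.foldl max 0 := by
        rw [pvMaxStep, PySem.Dict.getD_modify_self, PySem.Dict.getD_counter]
      have hcnt : (PySem.Dict.counter ds).modify (stk.length : Int) 0 (· + 1)
          = PySem.Dict.counter (ds ++ [(stk.length : Int)]) :=
        (PySem.Dict.counter_append_singleton ds _).symm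
      rw [hret, hcnt]
      have hcast : (((stk ++ ['(']).length : Nat) : Int) = (stk.length : Int) + 1 := by
        simp [List.length_append]
      rw [hcast] at hrun
      rw [hrun]
      rw [pvDepths_open, pvLvl_cons, if_pos rfl]
      simp [List.append_assoc, add_assoc]
    · by_cases hc' : c = ')'
      · subst hc'
        rw [pvOk_close, Bool.and_eq_true, decide_eq_true_eq] at hok
        obtain ⟨hd, hok⟩ := hok
        have hne : stk ≠ [] := by
          intro h; subst h; simp at hd
        obtain ⟨u, x, rfl⟩ : ∃ L b, stk = L ++ [b] := by
          rcases List.eq_nil_or_concat stk with rfl | ⟨L, b, h⟩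
          · exact absurd rfl hne
          · exact ⟨L, b, by simpa [List.concat_eq_append] using h⟩
        have hpop : PySem.List.pop? (u ++ [x]) (-1) = some (x, u) := PySem.List.pop?_last u x
        have hok' : pvOk r ((u.length : Nat) : Int) = true := by
          have : ((u ++ [x]).length : Int) - 1 = (u.length : Int) := by
            simp [List.length_append]
          rwa [this] at hok
        obtain ⟨stk', hrun⟩ := ih u ds hok'
        refine ⟨stk', ?_⟩
        rw [List.foldl_cons, pvStepA_close, hpop]
        have hlen : ((u ++ [x]).length : Int) - 1 = (u.length : Int) := by
          simp [List.length_append]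
        rw [hlen, hrun]
        have hdep : pvDepths (')' :: r) ((u ++ [x]).length : Int)
            = pvDepths r ((u.length : Nat) : Int) := by
          rw [pvDepths_close, hlen]
        rw [hdep]
        have hlv : ((u ++ [x]).length : Int) + pvLvl (')' :: r)
            = ((u.length : Nat) : Int) + pvLvl r := by
          rw [pvLvl_cons, if_neg (by decide : ¬ (')' = '(')), if_pos rfl]
          simp only [List.length_append, List.length_cons, List.length_nil]
          push_cast
          ring
        rw [hlv]
      · have hok' : pvOk r (stk.length : Int) = true := by
          rwa [pvOk_other c r _ hc hc'] at hok
        obtain ⟨stk', hrun⟩ := ih stk ds hok'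
        refine ⟨stk', ?_⟩
        rw [List.foldl_cons, pvStepA_other _ _ hc hc', hrun]
        rw [pvDepths_other c r _ hc hc', pvLvl_cons, if_neg hc, if_neg hc']
        simp

-- ---- properties of pvOk / pvDepths ----
lemma pvOk_mono (l : List Char) : ∀ d e : Int, pvOk l d = true → d ≤ e → pvOk l e = true := by
  induction l with
  | nil => intro d e _ _; rfl
  | cons c r ih =>
    intro d e h hde
    by_cases hc : c = '('
    · subst hc
      rw [pvOk_open] at h ⊢
      exact ih (d + 1) (e + 1) h (by omega)
    · by_cases hc' : c = ')'
      · subst hc'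
        rw [pvOk_close, Bool.and_eq_true, decide_eq_true_eq] at h ⊢
        exact ⟨by omega, ih (d - 1) (e - 1) h.2 (by omega)⟩
      · rw [pvOk_other c r d hc hc'] at h
        rw [pvOk_other c r e hc hc']
        exact ih d e h hde

lemma pvOk_append (u v : List Char) (d : Int) :
    pvOk (u ++ v) d = (pvOk u d && pvOk v (d + pvLvl u)) := by
  induction u generalizing d with
  | nil => simp [pvOk, pvLvl_nil]
  | cons c r ih =>
    by_cases hc : c = '('
    · subst hc
      rw [List.cons_append, pvOk_open, pvOk_open, ih, pvLvl_cons, if_pos rfl]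
      ring_nf
    · by_cases hc' : c = ')'
      · subst hc'
        rw [List.cons_append, pvOk_close, pvOk_close, ih, pvLvl_cons,
          if_neg (by decide : ¬ (')' = '(')), if_pos rfl, Bool.and_assoc]
        ring_nf
      · rw [List.cons_append, pvOk_other c _ _ hc hc', pvOk_other c _ _ hc hc', ih,
          pvLvl_cons, if_neg hc, if_neg hc']
        ring_nf

lemma pvDepths_append (u v : List Char) (d : Int) :
    pvDepths (u ++ v) d = pvDepths u d ++ pvDepths v (d + pvLvl u) := by
  induction u generalizing d with
  | nil => simp [pvDepths, pvLvl_nil]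
  | cons c r ih =>
    by_cases hc : c = '('
    · subst hc
      rw [List.cons_append, pvDepths_open, pvDepths_open, ih, pvLvl_cons, if_pos rfl,
        List.cons_append]
      ring_nf
    · by_cases hc' : c = ')'
      · subst hc'
        rw [List.cons_append, pvDepths_close, pvDepths_close, ih, pvLvl_cons,
          if_neg (by decide : ¬ (')' = '(')), if_pos rfl]
        ring_nf
      · rw [List.cons_append, pvDepths_other c _ _ hc hc', pvDepths_other c _ _ hc hc', ih,
          pvLvl_cons, if_neg hc, if_neg hc']
        ring_nf

lemma pvDepths_shift (l : List Char) (d e : Int) :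
    pvDepths l (d + e) = (pvDepths l d).map (· + e) := by
  induction l generalizing d with
  | nil => simp [pvDepths]
  | cons c r ih =>
    by_cases hc : c = '('
    · subst hc
      rw [pvDepths_open, pvDepths_open, List.map_cons,
        show d + e + 1 = (d + 1) + e by ring, ih]
    · by_cases hc' : c = ')'
      · subst hc'
        rw [pvDepths_close, pvDepths_close, show d + e - 1 = (d - 1) + e by ring, ih]
      · rw [pvDepths_other c _ _ hc hc', pvDepths_other c _ _ hc hc', ih]

lemma pvDepths_nonneg (l : List Char) (d : Int) (hok : pvOk l d = true) (hd : 0 ≤ d) :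
    ∀ x ∈ pvDepths l d, 0 ≤ x := by
  induction l generalizing d with
  | nil => simp [pvDepths]
  | cons c r ih =>
    by_cases hc : c = '('
    · subst hc
      rw [pvOk_open] at hok
      intro x hx
      rw [pvDepths_open, List.mem_cons] at hx
      rcases hx with rfl | hx
      · exact hd
      · exact ih (d + 1) hok (by omega) x hx
    · by_cases hc' : c = ')'
      · subst hc'
        rw [pvOk_close, Bool.and_eq_true, decide_eq_true_eq] at hok
        intro x hx
        rw [pvDepths_close] at hx
        exact ih (d - 1) hok.2 (by omega) x hx
      · rw [pvOk_other c _ _ hc hc'] at hok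
        intro x hx
        rw [pvDepths_other c _ _ hc hc'] at hx
        exact ih d hok hd x hx

-- ---- B-side: the fuel recursion never grows the remainder ----
lemma pvParse_rest_len (f : Nat) : ∀ l : List Char, (pvParse f l).2.length ≤ l.length := by
  induction f with
  | zero => intro l; simp [pvParse]
  | succ f ih =>
    intro l
    cases l with
    | nil => simp [pvParse]
    | cons c r =>
      by_cases hc : c = '('
      · subst hc
        have hstep : (pvParse (f + 1) ('(' :: r)).2 = (pvParse f (pvParse f r).2).2 := by
          simp [pvParse]
        rw [hstep]
        have h1 := ih r
        have h2 := ih (pvParse f r).2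
        simp only [List.length_cons]
        omega
      · by_cases hc' : c = ')'
        · subst hc'; simp [pvParse]
        · have hstep : pvParse (f + 1) (c :: r) = pvParse f r := by
            simp [pvParse, hc, hc']
          rw [hstep]
          have := ih r
          simp only [List.length_cons]
          omega

lemma pvAddVec_getD (xs : List Int) : ∀ (ys : List Int) (i : Nat),
    (pvAddVec xs ys).getD i 0 = xs.getD i 0 + ys.getD i 0 := by
  induction xs with
  | nil => intro ys i; cases ys <;> simp [pvAddVec]
  | cons x xs ih =>
    intro ys i
    cases ys with
    | nil => simp [pvAddVec]
    | cons y ys =>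
      cases i with
      | zero => simp [pvAddVec]
      | succ i => simpa [pvAddVec] using ih ys i

lemma pvCount_map_add_one (ds : List Int) (i : Int) (hpos : ∀ x ∈ ds, 0 ≤ x) :
    ((ds.map (· + 1)).count i : Int) = if i = 0 then 0 else (ds.count (i - 1) : Int) := by
  by_cases hi : i = 0
  · subst hi
    have : (0 : Int) ∉ ds.map (· + 1) := by
      intro h
      rcases List.mem_map.mp h with ⟨x, hx, hx0⟩
      have := hpos x hx; omega
    simp [List.count_eq_zero.mpr this]
  · rw [if_neg hi]
    have h2 : (ds.map (· + 1)).count ((i - 1) + 1) = ds.count (i - 1) :=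
      List.count_map_of_injective ds (· + 1) (add_left_injective 1) (i - 1)
    have h3 : (i - 1) + 1 = i := by ring
    rw [h3] at h2
    simp [h2]

-- combining one '(' , its inner histogram and the sibling histogram
lemma pvHist_cons (inner q d1 d2 : List Int)
    (h1 : ∀ i : Int, 0 ≤ i → inner.getD i.natAbs 0 = ((d1.count i : Nat) : Int))
    (h2 : ∀ i : Int, 0 ≤ i → q.getD i.natAbs 0 = ((d2.count i : Nat) : Int))
    (hpos : ∀ x ∈ d1, 0 ≤ x) :
    ∀ i : Int, 0 ≤ i → (pvAddVec (1 :: inner) q).getD i.natAbs 0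
      = ((((0 : Int) :: (d1.map (· + 1) ++ d2)).count i : Nat) : Int) := by
  intro i hi
  rw [pvAddVec_getD]
  have hm0 : ((d1.map (· + 1)).count (0 : Int)) = 0 := by
    apply List.count_eq_zero.mpr
    intro h
    rcases List.mem_map.mp h with ⟨x, hx, hx0⟩
    have := hpos x hx; omega
  by_cases hi0 : i = 0
  · subst hi0
    have h2' := h2 0 le_rfl
    simp only [Int.natAbs_zero] at h2' ⊢
    rw [List.getD_cons_zero, h2']
    simp [List.count_cons, List.count_append, hm0]
    omega
  · have h1' := h1 (i - 1) (by omega)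
    have h2' := h2 i hi
    have hnat : i.natAbs = (i - 1).natAbs + 1 := by omega
    rw [hnat] at h2' ⊢
    rw [List.getD_cons_succ, h1', h2']
    have hmc := pvCount_map_add_one d1 i hpos
    rw [if_neg hi0] at hmc
    have hne : ¬ (i = (0 : Int)) := hi0
    simp only [List.count_cons, List.count_append]
    simp [hne]
    omega

-- ---- the recursive parse computes the histogram of pvDepths ----
lemma pvParse_spec (f : Nat) : ∀ l : List Char, l.length ≤ f →
    ∃ pre : List Char,
      pvOk pre 0 = true ∧
      (∀ i : Int, 0 ≤ i →
        ((pvParse f l).1).getD i.natAbs 0 = (((pvDepths pre 0).count i : Nat) : Int)) ∧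
      ((l = pre ++ ')' :: (pvParse f l).2 ∧ pvLvl pre = 0) ∨ ((pvParse f l).2 = [] ∧ l = pre)) := by
  induction f with
  | zero =>
    intro l hl
    have : l = [] := List.length_eq_zero_iff.mp (Nat.le_zero.mp hl)
    subst this
    exact ⟨[], rfl, by intro i _; simp [pvParse, pvDepths], Or.inr ⟨rfl, rfl⟩⟩
  | succ f ih =>
    intro l hl
    cases l with
    | nil => exact ⟨[], rfl, by intro i _; simp [pvParse, pvDepths], Or.inr ⟨rfl, rfl⟩⟩
    | cons c r =>
      by_cases hc : c = '('
      · subst hc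
        have hr : r.length ≤ f := by simpa using hl
        obtain ⟨p1, hok1, hcnt1, hcase1⟩ := ih r hr
        have hr1 : (pvParse f r).2.length ≤ f := le_trans (pvParse_rest_len f r) hr
        obtain ⟨p2, hok2, hcnt2, hcase2⟩ := ih (pvParse f r).2 hr1
        have hstep1 : (pvParse (f + 1) ('(' :: r)).1
            = pvAddVec (1 :: (pvParse f r).1) (pvParse f (pvParse f r).2).1 := by
          simp [pvParse]
        have hstep2 : (pvParse (f + 1) ('(' :: r)).2 = (pvParse f (pvParse f r).2).2 := by
          simp [pvParse]
        have hpos1 : ∀ x ∈ pvDepths p1 0, 0 ≤ x := pvDepths_nonneg p1 0 hok1 le_rfl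
        have hsh1 : pvDepths p1 1 = (pvDepths p1 0).map (· + 1) := by
          simpa using pvDepths_shift p1 0 1
        rcases hcase1 with ⟨hreq, hlvl1⟩ | ⟨hrest1, hreq⟩
        · -- inner group closed by a ')'
          refine ⟨'(' :: p1 ++ ')' :: p2, ?_, ?_, ?_⟩
          · rw [show ('(' :: p1 ++ ')' :: p2) = ('(' :: p1) ++ (')' :: p2) from rfl, pvOk_append]
            have hlv : pvLvl ('(' :: p1) = 1 := by
              rw [pvLvl_cons, if_pos rfl, hlvl1]
              norm_num
            have hok1' : pvOk p1 1 = true := pvOk_mono p1 0 1 hok1 (by norm_num)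
            rw [hlv, pvOk_open, pvOk_close]
            simp [hok1', hok2]
          · intro i hi
            rw [hstep1]
            have hdep : pvDepths ('(' :: p1 ++ ')' :: p2) 0
                = 0 :: ((pvDepths p1 0).map (· + 1) ++ pvDepths p2 0) := by
              rw [pvDepths_append, pvDepths_open, zero_add, hsh1, pvLvl_cons, if_pos rfl,
                hlvl1, pvDepths_close]
              simp
            rw [hdep]
            exact pvHist_cons _ _ _ _ hcnt1 hcnt2 hpos1 i hi
          · rcases hcase2 with ⟨hreq2, hlvl2⟩ | ⟨hrest2, hreq2⟩
            · left
              constructor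
              · rw [hstep2]
                rw [hreq2] at hreq
                simpa [List.append_assoc] using congrArg (List.cons '(') hreq
              · rw [show ('(' :: p1 ++ ')' :: p2) = ('(' :: p1) ++ (')' :: p2) from rfl,
                  pvLvl_append, pvLvl_cons, if_pos rfl,
                  pvLvl_cons, if_neg (by decide : ¬ (')' = '(')), if_pos rfl, hlvl1, hlvl2]
                ring
            · right
              constructor
              · rw [hstep2, hrest2]
              · rw [hreq2] at hreq
                exact congrArg (List.cons '(') hreq
        · -- inner group ran to end of input (unclosed '(')
          have hq : pvParse f (pvParse f r).2 = ([], []) := by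
            rw [hrest1]; cases f <;> rfl
          refine ⟨'(' :: p1, ?_, ?_, ?_⟩
          · rw [pvOk_open]
            exact pvOk_mono p1 0 1 hok1 (by norm_num)
          · intro i hi
            rw [hstep1, hq]
            have hdep : pvDepths ('(' :: p1) 0
                = 0 :: ((pvDepths p1 0).map (· + 1) ++ []) := by
              rw [pvDepths_open, List.append_nil]
              norm_num [hsh1]
            rw [hdep]
            exact pvHist_cons _ _ _ ([] : List Int) hcnt1 (by intro j _; simp) hpos1 i hi
          · right
            refine ⟨by rw [hstep2, hq], by rw [hreq]⟩
      · by_cases hc' : c = ')'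
        · subst hc'
          refine ⟨[], rfl, ?_, ?_⟩
          · intro i _; simp [pvParse, pvDepths]
          · left; simp [pvParse, pvLvl_nil]
        · have hr : r.length ≤ f := by simpa using hl
          obtain ⟨pre, hok, hcnt, hcase⟩ := ih r hr
          have hstep : pvParse (f + 1) (c :: r) = pvParse f r := by
            simp [pvParse, hc, hc']
          refine ⟨c :: pre, ?_, ?_, ?_⟩
          · rw [pvOk_other c _ _ hc hc']; exact hok
          · intro i hi
            rw [hstep, hcnt i hi, pvDepths_other c _ _ hc hc']
          · rcases hcase with ⟨hreq, hlvl⟩ | ⟨hrest, hreq⟩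
            · left
              refine ⟨?_, ?_⟩
              · rw [hstep]
                exact congrArg (List.cons c) hreq
              · rw [pvLvl_cons, if_neg hc, if_neg hc', hlvl]; ring
            · right
              exact ⟨by rw [hstep, hrest], by rw [hreq]⟩

-- Pre_ (no prefix with more ')' than '(') implies the matchedness scan succeeds
lemma pvPre_ok (l : List Char) : ∀ d : Int, 0 ≤ d →
    (∀ p ∈ l.inits, ((p.count ')' : Nat) : Int) ≤ d + ((p.count '(' : Nat) : Int)) →
    pvOk l d = true := by
  induction l with
  | nil => intro d _ _; rfl
  | cons c r ih =>
    intro d hd h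
    have hmem : ∀ p ∈ r.inits, c :: p ∈ (c :: r).inits := by
      intro p hp
      rw [List.inits_cons, List.mem_cons]
      exact Or.inr (List.mem_map.mpr ⟨p, hp, rfl⟩)
    by_cases hc : c = '('
    · subst hc
      rw [pvOk_open]
      apply ih (d + 1) (by omega)
      intro p hp
      have := h ('(' :: p) (hmem p hp)
      simp [List.count_cons] at this ⊢
      omega
    · by_cases hc' : c = ')'
      · subst hc'
        have h1 := h [')'] (hmem [] (by simp))
        simp [List.count_cons] at h1
        rw [pvOk_close, Bool.and_eq_true, decide_eq_true_eq]
        refine ⟨by omega, ?_⟩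
        apply ih (d - 1) (by omega)
        intro p hp
        have := h (')' :: p) (hmem p hp)
        simp [List.count_cons] at this ⊢
        omega
      · rw [pvOk_other c _ _ hc hc']
        apply ih d hd
        intro p hp
        have := h (c :: p) (hmem p hp)
        simp [List.count_cons, hc, hc'] at this ⊢
        omega

-- a histogram list and the counter of the underlying multiset have the same running max
lemma pvBridge (cnts ds : List Int) (hds : ∀ x ∈ ds, 0 ≤ x)
    (h : ∀ i : Int, 0 ≤ i → cnts.getD i.natAbs 0 = ((ds.count i : Nat) : Int)) :
    PySem.List.maxD cnts (fun v => v) 0 = (PySem.Dict.counter ds).values.foldl max 0 := by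
  have hidx : ∀ x ∈ cnts, ∃ j : Nat, cnts.getD j 0 = x := by
    intro x hx
    obtain ⟨j, hj, rfl⟩ := List.mem_iff_getElem.mp hx
    exact ⟨j, by rw [List.getD_eq_getElem?_getD, List.getElem?_eq_getElem hj]; rfl⟩
  have hval : ∀ j : Nat, cnts.getD j 0 = ((ds.count (j : Int) : Nat) : Int) := by
    intro j
    have := h (j : Int) (by positivity)
    rwa [Int.natAbs_natCast] at this
  have hnn : ∀ x ∈ cnts, 0 ≤ x := by
    intro x hx
    obtain ⟨j, hj⟩ := hidx x hx
    rw [← hj, hval j]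
    positivity
  rw [pvMaxD_eq cnts hnn]
  apply le_antisymm
  · apply pvFoldLe _ _ _ (pvInitLe _ _)
    intro x hx
    obtain ⟨j, hj⟩ := hidx x hx
    rw [← hj, hval j]
    by_cases h0 : ds.count (j : Int) = 0
    · rw [h0]
      exact_mod_cast pvInitLe _ _
    · have hmem : (j : Int) ∈ ds := List.count_pos_iff.mp (by omega)
      apply pvLeFold
      rw [pvValues_counter]
      exact List.mem_map.mpr ⟨(j : Int), by simpa [PySem.Set.mem_ofList] using hmem, rfl⟩
  · apply pvFoldLe _ _ _ (pvInitLe _ _)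
    intro v hv
    rw [pvValues_counter] at hv
    obtain ⟨j, hjS, rfl⟩ := List.mem_map.mp hv
    have hjmem : j ∈ ds := by simpa [PySem.Set.mem_ofList] using hjS
    have hj0 : 0 ≤ j := hds j hjmem
    have hcnt : 0 < ds.count j := List.count_pos_iff.mpr hjmem
    have hget : cnts.getD j.natAbs 0 = ((ds.count j : Nat) : Int) := h j hj0
    have hlt : j.natAbs < cnts.length := by
      by_contra hge
      rw [List.getD_eq_default _ _ (by omega)] at hget
      omega
    apply pvLeFold
    have : cnts.getD j.natAbs 0 = cnts[j.natAbs] := by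
      rw [List.getD_eq_getElem?_getD, List.getElem?_eq_getElem hlt]; rfl
    rw [← hget, this]
    exact List.getElem_mem hlt

-- ===== VERDICT (by name: the statement is the Claim_ definition above) =====
theorem max_breadth_spec : Claim_equal_max_breadth := by
  intro s _ hpre
  unfold Spec_max_breadth
  have hok : pvOk s.toList 0 = true := by
    apply pvPre_ok s.toList 0 le_rfl
    intro p hp
    have := hpre p hp
    omega
  -- A computes the running max of the counter of the depth list
  obtain ⟨stk', hrun⟩ := pvARun s.toList [] [] (by simpa using hok)
  have hA : max_breadth s
      = (PySem.Dict.counter (pvDepths s.toList 0)).values.foldl max 0 := by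
    simp only [List.length_nil, Int.natCast_zero, List.nil_append] at hrun
    rw [show PySem.Dict.counter ([] : List Int) = PySem.Dict.empty from rfl,
      show List.foldl max 0 (PySem.Dict.empty : PySem.Dict Int Int).values = 0 from rfl] at hrun
    simp only [max_breadth]
    rw [hrun]
  -- B's parse consumes everything and yields the histogram of the same depth list
  obtain ⟨pre, hokp, hcnt, hcase⟩ := pvParse_spec s.toList.length s.toList le_rfl
  rcases hcase with ⟨hreq, hlvl⟩ | ⟨-, hreq⟩
  · exfalso
    rw [hreq, pvOk_append, pvOk_close, hlvl] at hok
    simp at hok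
  · rw [← hreq] at hcnt hokp
    have hB : max_breadth_alt s
        = (PySem.Dict.counter (pvDepths s.toList 0)).values.foldl max 0 := by
      simp only [max_breadth_alt]
      exact pvBridge _ _ (pvDepths_nonneg s.toList 0 hok le_rfl) hcnt
    rw [hA, hB]
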